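-- pv_equiv track=rewrite | github.com/Orshouldyushi132/super-parakeet | midi_video_app/midi_loader.py | _detect_chord
-- ===== SOURCE A (Python) =====
-- def _detect_chord(active_pitches: list[int]) -> tuple[str, tuple[str, ...]]:
--     if not active_pitches:
--         return "", ()
--
--     unique_pitches = sorted(dict.fromkeys(active_pitches))
--     note_names = tuple(_midi_note_name(pitch) for pitch in unique_pitches)
--     pitch_classes = sorted({pitch % 12 for pitch in unique_pitches})
--     bass_pc = unique_pitches[0] % 12
--
--     if len(pitch_classes) == 1:
--         return _pitch_class_name(bass_pc), note_names
--
--     chord_patterns = (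
--         ("maj7", {0, 4, 7, 11}),
--         ("m7", {0, 3, 7, 10}),
--         ("7", {0, 4, 7, 10}),
--         ("mMaj7", {0, 3, 7, 11}),
--         ("dim7", {0, 3, 6, 9}),
--         ("m7b5", {0, 3, 6, 10}),
--         ("6", {0, 4, 7, 9}),
--         ("m6", {0, 3, 7, 9}),
--         ("add9", {0, 2, 4, 7}),
--         ("madd9", {0, 2, 3, 7}),
--         ("sus2", {0, 2, 7}),
--         ("sus4", {0, 5, 7}),
--         ("aug", {0, 4, 8}),
--         ("dim", {0, 3, 6}),
--         ("m", {0, 3, 7}),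
--         ("", {0, 4, 7}),
--         ("5", {0, 7}),
--     )
--
--     best_score = float("-inf")
--     best_name = ""
--     for root_pc in pitch_classes:
--         intervals = {(pitch_class - root_pc) % 12 for pitch_class in pitch_classes}
--         for suffix, pattern in chord_patterns:
--             if not pattern.issubset(intervals):
--                 continue
--             extras = len(intervals - pattern)
--             bass_bonus = 3 if bass_pc == root_pc else 0
--             score = len(pattern) * 12 - extras * 4 + bass_bonus
--             if score <= best_score:
--                 continue
--
--             chord_name = f"{_pitch_class_name(root_pc)}{suffix}"
--             if bass_pc != root_pc:
--                 chord_name = f"{chord_name}/{_pitch_class_name(bass_pc)}"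
--             best_score = score
--             best_name = chord_name
--
--     if best_name:
--         return best_name, note_names
--     return "N.C.", note_names
--
-- def _pitch_class_name(pitch_class: int) -> str:
--     names = ("C", "C#", "D", "Eb", "E", "F", "F#", "G", "Ab", "A", "Bb", "B")
--     return names[pitch_class % 12]
--
-- def _midi_note_name(note_number: int) -> str:
--     octave = note_number // 12 - 1
--     return f"{_pitch_class_name(note_number)}{octave}"
-- ===== SOURCE B (Python) =====
-- _NAMES = ("C", "C#", "D", "Eb", "E", "F", "F#", "G", "Ab", "A", "Bb", "B")
--
-- _CHORD_PATTERNS = (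
--     ("maj7", (0, 4, 7, 11)),
--     ("m7", (0, 3, 7, 10)),
--     ("7", (0, 4, 7, 10)),
--     ("mMaj7", (0, 3, 7, 11)),
--     ("dim7", (0, 3, 6, 9)),
--     ("m7b5", (0, 3, 6, 10)),
--     ("6", (0, 4, 7, 9)),
--     ("m6", (0, 3, 7, 9)),
--     ("add9", (0, 2, 4, 7)),
--     ("madd9", (0, 2, 3, 7)),
--     ("sus2", (0, 2, 7)),
--     ("sus4", (0, 5, 7)),
--     ("aug", (0, 4, 8)),
--     ("dim", (0, 3, 6)),
--     ("m", (0, 3, 7)),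
--     ("", (0, 4, 7)),
--     ("5", (0, 7)),
-- )
--
--
-- def _pitch_class_name(pitch_class: int) -> str:
--     return _NAMES[pitch_class % 12]
--
--
-- def _midi_note_name(note_number: int) -> str:
--     octave = note_number // 12 - 1
--     return f"{_pitch_class_name(note_number)}{octave}"
--
--
-- def _detect_chord(active_pitches: list[int]) -> tuple[str, tuple[str, ...]]:
--     # Scoreless reformulation: since every root's interval set has exactly
--     # len(pitch_classes) elements, A's score 12*|pattern| - 4*extras + bass_bonus
--     # equals 16*|pattern| - 4*len(pitch_classes) + bass_bonus, so the best chord is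
--     # simply the largest matching pattern, preferring a bass-rooted match.
--     if not active_pitches:
--         return "", ()
--
--     unique_pitches = sorted(set(active_pitches))
--     note_names = tuple(_midi_note_name(pitch) for pitch in unique_pitches)
--     pitch_classes = sorted({pitch % 12 for pitch in unique_pitches})
--     bass_pc = unique_pitches[0] % 12
--
--     if len(pitch_classes) == 1:
--         return _pitch_class_name(bass_pc), note_names
--
--     pc_set = set(pitch_classes)
--     matches = [
--         (len(pattern), root, suffix)
--         for root in pitch_classes
--         for suffix, pattern in _CHORD_PATTERNS
--         if all((root + interval) % 12 in pc_set for interval in pattern)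
--     ]
--     if not matches:
--         return "N.C.", note_names
--
--     top = max(size for size, _, _ in matches)
--     winner = next((m for m in matches if m[0] == top and m[1] == bass_pc), None)
--     if winner is None:
--         winner = next(m for m in matches if m[0] == top)
--
--     _, root, suffix = winner
--     name = _pitch_class_name(root) + suffix
--     if root != bass_pc:
--         name = f"{name}/{_pitch_class_name(bass_pc)}"
--     return name, note_names
-- ===== Notes on version B (the rewrite author's own statement) =====
-- stated objective: alternative
-- what changed: Eliminates A's per-match score arithmetic and running best_score/best_name maximum: since every root's interval set has exactly len(pitch_classes) elements, A's score is 16*|pattern| - 4*len(pitch_classes) + bass_bonus, so B collects scoreless (size, root, suffix) match records (testing (root+interval)%12 membership in the pitch-class set instead of building per-root interval sets) and selects by largest pattern size, preferring a bass-rooted match, with A's first-in-scan-order tie-break.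
import Mathlib
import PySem

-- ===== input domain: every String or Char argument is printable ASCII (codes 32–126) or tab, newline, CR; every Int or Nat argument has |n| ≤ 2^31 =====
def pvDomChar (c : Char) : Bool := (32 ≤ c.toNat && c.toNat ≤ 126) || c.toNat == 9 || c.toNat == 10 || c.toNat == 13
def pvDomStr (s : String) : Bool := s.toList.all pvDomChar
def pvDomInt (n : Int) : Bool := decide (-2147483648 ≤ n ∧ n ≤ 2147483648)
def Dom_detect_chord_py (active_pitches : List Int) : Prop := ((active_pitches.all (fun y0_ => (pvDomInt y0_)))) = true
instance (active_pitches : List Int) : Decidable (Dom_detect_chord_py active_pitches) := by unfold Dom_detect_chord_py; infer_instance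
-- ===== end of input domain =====

-- B drops A's per-match score arithmetic: because every root's interval set has exactly
-- len(pitch_classes) elements, A's score is 16*|pattern| - 4*len(pitch_classes) + bass_bonus,
-- so B collects scoreless (size, root, suffix) matches (testing (root+interval)%12 membership
-- instead of building interval sets) and picks the largest pattern, preferring the bass root.

-- ===== PORT A =====
-- shared module helpers of both Pythons
def pcName (pitch_class : Int) : String :=
  -- names[pitch_class % 12]; exact: 0 ≤ pitch_class % 12 < 12, so the index is always in range
  PySem.List.pyGetD ["C", "C#", "D", "Eb", "E", "F", "F#", "G", "Ab", "A", "Bb", "B"]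
    (PySem.Int.mod pitch_class 12) ""

def midiNoteName (note_number : Int) : String :=
  pcName note_number ++ PySem.Int.toStr (PySem.Int.floordiv note_number 12 - 1)

def chordPatterns : List (String × List Int) :=
  [("maj7", [0, 4, 7, 11]), ("m7", [0, 3, 7, 10]), ("7", [0, 4, 7, 10]),
   ("mMaj7", [0, 3, 7, 11]), ("dim7", [0, 3, 6, 9]), ("m7b5", [0, 3, 6, 10]),
   ("6", [0, 4, 7, 9]), ("m6", [0, 3, 7, 9]), ("add9", [0, 2, 4, 7]),
   ("madd9", [0, 2, 3, 7]), ("sus2", [0, 2, 7]), ("sus4", [0, 5, 7]),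
   ("aug", [0, 4, 8]), ("dim", [0, 3, 6]), ("m", [0, 3, 7]),
   ("", [0, 4, 7]), ("5", [0, 7])]

def detect_chord_py (active_pitches : List Int) : String × List String :=
  if active_pitches = [] then ("", [])
  else
    let unique := PySem.List.sorted (PySem.List.dedup active_pitches) (fun x => x) false
    let noteNames := unique.map midiNoteName
    let pitchClasses :=
      PySem.List.sorted (PySem.Set.ofList (unique.map fun p => PySem.Int.mod p 12)) (fun x => x) false
    let bassPc := PySem.Int.mod (PySem.List.pyGetD unique 0 0) 12  -- unique_pitches[0]; exact: unique ≠ [] here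
    if pitchClasses.length = 1 then (pcName bassPc, noteNames)
    else
      -- best_score = -inf is encoded as none (no score yet): 'score <= -inf' is always false
      let best :=
        pitchClasses.foldl (fun (b : Option Int × String) rootPc =>
          let intervals : PySem.Set Int :=
            PySem.Set.ofList (pitchClasses.map fun pc => PySem.Int.mod (pc - rootPc) 12)
          chordPatterns.foldl (fun (b : Option Int × String) sp =>
            if PySem.Set.issubset sp.2 intervals then
              let extras : Int := (PySem.Set.diff intervals sp.2).length
              let bassBonus : Int := if bassPc = rootPc then 3 else 0
              let score := (sp.2.length : Int) * 12 - extras * 4 + bassBonus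
              if (match b.1 with | none => false | some s => decide (score ≤ s)) then b
              else
                let chordName := pcName rootPc ++ sp.1
                let chordName := if bassPc ≠ rootPc then chordName ++ "/" ++ pcName bassPc else chordName
                (some score, chordName)
            else b) b) ((none : Option Int), "")
      if best.2 ≠ "" then (best.2, noteNames) else ("N.C.", noteNames)

-- ===== PORT B =====
def detect_chord_py_alt (active_pitches : List Int) : String × List String :=
  if active_pitches = [] then ("", [])
  else
    let unique := PySem.List.sorted (PySem.Set.ofList active_pitches) (fun x => x) false
    let noteNames := unique.map midiNoteName
    let pitchClasses :=
      PySem.List.sorted (PySem.Set.ofList (unique.map fun p => PySem.Int.mod p 12)) (fun x => x) false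
    let bassPc := PySem.Int.mod (PySem.List.pyGetD unique 0 0) 12  -- unique_pitches[0]; exact: unique ≠ [] here
    if pitchClasses.length = 1 then (pcName bassPc, noteNames)
    else
      let pcSet : PySem.Set Int := PySem.Set.ofList pitchClasses
      let matchesL := pitchClasses.flatMap (fun root =>
        (chordPatterns.filter (fun sp =>
            sp.2.all (fun iv => PySem.Set.contains pcSet (PySem.Int.mod (root + iv) 12)))).map
          (fun sp => ((sp.2.length : Int), root, sp.1)))
      -- 'if not matches: return N.C.' then 'top = max(sizes)': max? is none exactly when matches = []
      match PySem.List.max? (matchesL.map fun m => m.1) (fun x => x) with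
      | none => ("N.C.", noteNames)
      | some top =>
        let winner :=
          match matchesL.find? (fun m : Int × Int × String => m.1 == top && m.2.1 == bassPc) with  -- next(..., None)
          | some w => w
          | none => (matchesL.find? (fun m : Int × Int × String => m.1 == top)).getD (0, 0, "")  -- bare next(); guarded: top is attained
        let name := pcName winner.2.1 ++ winner.2.2
        let name := if winner.2.1 ≠ bassPc then name ++ "/" ++ pcName bassPc else name
        (name, noteNames)

-- ===== PRECONDITION & SPEC =====
def Spec_detect_chord_py (active_pitches : List Int) (out : String × List String) : Prop := out = detect_chord_py_alt active_pitches
instance (active_pitches : List Int) (out : String × List String) : Decidable (Spec_detect_chord_py active_pitches out) := by unfold Spec_detect_chord_py; infer_instance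

-- ===== CLAIM (what is proved, stated in full; the proofs are below) =====
def Claim_equal_detect_chord_py : Prop := ∀ (active_pitches : List Int), Dom_detect_chord_py active_pitches → Spec_detect_chord_py active_pitches (detect_chord_py active_pitches)

-- ===== LEMMAS AND PROOFS =====

-- the interval set A builds for a candidate root
def pvIntervals (pcs : List Int) (root : Int) : PySem.Set Int :=
  PySem.Set.ofList (pcs.map fun pc => PySem.Int.mod (pc - root) 12)

-- A's (score, chord_name) candidate for one root/pattern pair
def pvEmit (pcs : List Int) (bass root : Int) (sp : String × List Int) : Int × String :=
  ((sp.2.length : Int) * 12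
     - ((PySem.Set.diff (pvIntervals pcs root) sp.2).length : Int) * 4
     + (if bass = root then 3 else 0),
   if bass ≠ root then (pcName root ++ sp.1) ++ "/" ++ pcName bass else pcName root ++ sp.1)

def pvCandsFor (pcs : List Int) (bass root : Int) : List (Int × String) :=
  (chordPatterns.filter fun sp => PySem.Set.issubset sp.2 (pvIntervals pcs root)).map (pvEmit pcs bass root)

def pvCands (pcs : List Int) (bass : Int) : List (Int × String) :=
  pcs.flatMap (pvCandsFor pcs bass)

-- B's (size, root, suffix) match record
def pvTag (root : Int) (sp : String × List Int) : Int × Int × String :=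
  ((sp.2.length : Int), root, sp.1)

def pvMatches (pcs : List Int) : List (Int × Int × String) :=
  pcs.flatMap fun root =>
    (chordPatterns.filter fun sp => PySem.Set.issubset sp.2 (pvIntervals pcs root)).map (pvTag root)

-- A's score and name as a function of B's match record (C = number of pitch classes)
def pvKey (C bass : Int) (m : Int × Int × String) : Int :=
  16 * m.1 - 4 * C + (if bass = m.2.1 then 3 else 0)

def pvName (bass : Int) (m : Int × Int × String) : String :=
  if bass ≠ m.2.1 then (pcName m.2.1 ++ m.2.2) ++ "/" ++ pcName bass else pcName m.2.1 ++ m.2.2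

def pvG (C bass : Int) (m : Int × Int × String) : Int × String :=
  (pvKey C bass m, pvName bass m)

-- A's strict-improvement update of (best_score, best_name)
def pvUpd (b : Option Int × String) (c : Int × String) : Option Int × String :=
  if (match b.1 with | none => false | some s => decide (c.1 ≤ s)) then b else (some c.1, c.2)

lemma pcName_ne (x : Int) : pcName x ≠ "" := by
  have h0 : 0 ≤ PySem.Int.mod x 12 := PySem.Int.mod_nonneg x (by norm_num)
  have h1 : PySem.Int.mod x 12 < 12 := PySem.Int.mod_lt x (by norm_num)
  rw [pcName, PySem.List.pyGetD_of_nonneg _ _ h0]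
  have h2 : (PySem.Int.mod x 12).toNat < 12 := by omega
  set m := (PySem.Int.mod x 12).toNat with hm
  interval_cases m <;> decide

lemma append_ne (s t : String) (h : s ≠ "") : s ++ t ≠ "" := by
  intro he
  apply h
  have hd := congrArg String.toList he
  simp only [String.toList_append] at hd
  simp at hd
  exact hd.1

lemma name_ne (bass : Int) (m : Int × Int × String) : pvName bass m ≠ "" := by
  unfold pvName
  split_ifs
  · exact append_ne _ _ (append_ne _ _ (append_ne _ _ (pcName_ne m.2.1)))
  · exact append_ne _ _ (pcName_ne m.2.1)

lemma foldl_flatMap_eq {α β δ : Type} (g : α → List β) (f : δ → β → δ) :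
    ∀ (l : List α) (init : δ),
      (l.flatMap g).foldl f init = l.foldl (fun b x => (g x).foldl f b) init := by
  intro l
  induction l with
  | nil => intro init; rfl
  | cons x t ih =>
      intro init
      simp only [List.flatMap_cons, List.foldl_append, List.foldl_cons]
      exact ih _

def pvStep (acc : Option (Int × String)) (x : Int × String) : Option (Int × String) :=
  match acc with
  | none => some x
  | some m => if m.1 < x.1 then some x else some m

def pvEnc : Option (Int × String) → Option Int × String
  | none => ((none : Option Int), "")
  | some c => (some c.1, c.2)

lemma foldA_gen (L : List (Int × String)) :
    ∀ (o : Option (Int × String)),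
      L.foldl pvUpd (pvEnc o) = pvEnc (L.foldl pvStep o) := by
  induction L with
  | nil => intro o; rfl
  | cons c t ih =>
      intro o
      have hstep : pvUpd (pvEnc o) c = pvEnc (pvStep o c) := by
        cases o with
        | none => rfl
        | some m =>
            by_cases h : m.1 < c.1
            · simp [pvUpd, pvEnc, pvStep, h, not_le.mpr h]
            · simp [pvUpd, pvEnc, pvStep, h, not_lt.mp h]
      simp only [List.foldl_cons, hstep]
      exact ih _

lemma foldA_eq (L : List (Int × String)) :
    L.foldl pvUpd ((none : Option Int), "")
      = pvEnc (PySem.List.max? L (fun c : Int × String => c.1)) := by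
  have hmax : PySem.List.max? L (fun c : Int × String => c.1) = L.foldl pvStep none := by
    unfold PySem.List.max?
    exact PySem.List.foldl_congr_mem L _ pvStep none
      (by intro acc x _; cases acc <;> simp [pvStep])
  rw [hmax, show ((none : Option Int), "") = pvEnc none from rfl]
  exact foldA_gen L none

-- max? is the FIRST element attaining the maximum: characterisation via find?
lemma pvMax_stay {α : Type} (f : α → Int) :
    ∀ (L : List α) (a : α), (∀ x ∈ L, f x ≤ f a) →
      L.foldl (fun acc x => match acc with
        | none => some x
        | some m => if f m < f x then some x else some m) (some a) = some a := by
  intro L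
  induction L with
  | nil => intro a _; rfl
  | cons x t ih =>
      intro a h
      have hx : ¬ f a < f x := not_lt.mpr (h x (by simp))
      simp only [List.foldl_cons, if_neg hx]
      exact ih a (fun y hy => h y (by simp [hy]))

lemma pvMax_run {α : Type} (f : α → Int) (M : Int) :
    ∀ (L : List α) (a : α), f a < M → (∀ x ∈ L, f x ≤ M) → (∃ x ∈ L, M ≤ f x) →
      L.foldl (fun acc x => match acc with
        | none => some x
        | some m => if f m < f x then some x else some m) (some a)
        = L.find? (fun x => decide (M ≤ f x)) := by
  intro L
  induction L with
  | nil =>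
      intro a _ _ hex
      rcases hex with ⟨x, hx, _⟩
      exact absurd hx (by simp)
  | cons x t ih =>
      intro a ha hub hex
      by_cases hx : M ≤ f x
      · have hax : f a < f x := lt_of_lt_of_le ha hx
        have hxM : f x = M := le_antisymm (hub x (by simp)) hx
        simp only [List.foldl_cons, if_pos hax]
        rw [List.find?_cons_of_pos (by simp [hx])]
        exact pvMax_stay f t x (fun y hy => hxM ▸ hub y (by simp [hy]))
      · have hfind : List.find? (fun y => decide (M ≤ f y)) (x :: t)
            = List.find? (fun y => decide (M ≤ f y)) t :=
          List.find?_cons_of_neg (by simp [hx])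
        have hex' : ∃ y ∈ t, M ≤ f y := by
          rcases hex with ⟨y, hy, hMy⟩
          rcases List.mem_cons.mp hy with rfl | hyt
          · exact absurd hMy hx
          · exact ⟨y, hyt, hMy⟩
        have hub' : ∀ y ∈ t, f y ≤ M := fun y hy => hub y (by simp [hy])
        simp only [List.foldl_cons, hfind]
        by_cases hax : f a < f x
        · simp only [if_pos hax]
          exact ih x (lt_of_not_ge hx) hub' hex'
        · simp only [if_neg hax]
          exact ih a ha hub' hex'

lemma pvMax_eq_find? {α : Type} (L : List α) (f : α → Int) (M : Int)
    (hub : ∀ x ∈ L, f x ≤ M) (hex : ∃ x ∈ L, M ≤ f x) :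
    PySem.List.max? L f = L.find? (fun x => decide (M ≤ f x)) := by
  cases L with
  | nil => rcases hex with ⟨x, hx, _⟩; exact absurd hx (by simp)
  | cons x t =>
      show (x :: t).foldl _ none = _
      by_cases hx : M ≤ f x
      · have hxM : f x = M := le_antisymm (hub x (by simp)) hx
        simp only [List.foldl_cons]
        rw [List.find?_cons_of_pos (by simp [hx])]
        exact pvMax_stay f t x (fun y hy => hxM ▸ hub y (by simp [hy]))
      · rw [List.find?_cons_of_neg (by simp [hx])]
        simp only [List.foldl_cons]
        refine pvMax_run f M t x (lt_of_not_ge hx) (fun y hy => hub y (by simp [hy])) ?_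
        rcases hex with ⟨y, hy, hMy⟩
        rcases List.mem_cons.mp hy with rfl | hyt
        · exact absurd hMy hx
        · exact ⟨y, hyt, hMy⟩

lemma pvFind_congr {α : Type} (p q : α → Bool) :
    ∀ (L : List α), (∀ x ∈ L, p x = q x) → L.find? p = L.find? q := by
  intro L
  induction L with
  | nil => intro _; rfl
  | cons x t ih =>
      intro h
      have hx := h x (by simp)
      by_cases hp : p x = true
      · rw [List.find?_cons_of_pos hp, List.find?_cons_of_pos (hx ▸ hp)]
      · rw [List.find?_cons_of_neg hp, List.find?_cons_of_neg (by rw [← hx]; exact hp)]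
        exact ih (fun y hy => h y (by simp [hy]))

-- membership in A's interval set, rephrased as B's rooted membership test
lemma mem_intervals (pcs : List Int) (hbd : ∀ x ∈ pcs, 0 ≤ x ∧ x < 12) (root iv : Int)
    (hiv : 0 ≤ iv ∧ iv < 12) :
    iv ∈ pvIntervals pcs root ↔ PySem.Int.mod (root + iv) 12 ∈ pcs := by
  unfold pvIntervals
  rw [PySem.Set.mem_ofList, List.mem_map]
  constructor
  · rintro ⟨pc, hpc, heq⟩
    have hb := hbd pc hpc
    rw [PySem.Int.mod_eq_emod_of_pos (by norm_num)] at heq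
    have : PySem.Int.mod (root + iv) 12 = pc := by
      rw [PySem.Int.mod_eq_emod_of_pos (by norm_num)]
      omega
    rwa [this]
  · intro hmem
    refine ⟨PySem.Int.mod (root + iv) 12, hmem, ?_⟩
    have h0 : 0 ≤ PySem.Int.mod (root + iv) 12 := PySem.Int.mod_nonneg _ (by norm_num)
    have h1 : PySem.Int.mod (root + iv) 12 < 12 := PySem.Int.mod_lt _ (by norm_num)
    rw [PySem.Int.mod_eq_emod_of_pos (by norm_num)]
    rw [PySem.Int.mod_eq_emod_of_pos (by norm_num)] at h0 h1 ⊢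
    omega

-- A's subset test equals B's membership test
lemma pred_eq (pcs : List Int) (hbd : ∀ x ∈ pcs, 0 ≤ x ∧ x < 12) (root : Int)
    (sp : String × List Int) (hsp : ∀ iv ∈ sp.2, 0 ≤ iv ∧ iv < 12) :
    PySem.Set.issubset sp.2 (pvIntervals pcs root)
      = sp.2.all (fun iv => PySem.Set.contains (PySem.Set.ofList pcs) (PySem.Int.mod (root + iv) 12)) := by
  unfold PySem.Set.issubset PySem.Set.contains
  rw [Bool.eq_iff_iff]
  simp only [List.all_eq_true, List.contains_iff_mem, PySem.Set.mem_ofList]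
  exact forall₂_congr fun iv hiv => mem_intervals pcs hbd root iv (hsp iv hiv)

-- with a pattern inside the interval set, A's extras count is |pitch_classes| - |pattern|
lemma diff_len (pcs : List Int) (hbd : ∀ x ∈ pcs, 0 ≤ x ∧ x < 12) (hnd : pcs.Nodup)
    (root : Int) (sp : String × List Int) (hspn : sp.2.Nodup)
    (hsub : PySem.Set.issubset sp.2 (pvIntervals pcs root) = true) :
    ((PySem.Set.diff (pvIntervals pcs root) sp.2).length : Int)
      = (pcs.length : Int) - sp.2.length := by
  have hInd : (pvIntervals pcs root).Nodup := PySem.Set.nodup_ofList _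
  have hIlen : (pvIntervals pcs root).length = pcs.length := by
    unfold pvIntervals
    rw [PySem.Set.ofList_eq_self_of_nodup]
    · exact List.length_map ..
    · refine List.Nodup.map_on ?_ hnd
      intro x hx y hy hxy
      have hbx := hbd x hx
      have hby := hbd y hy
      rw [PySem.Int.mod_eq_emod_of_pos (by norm_num),
          PySem.Int.mod_eq_emod_of_pos (by norm_num)] at hxy
      omega
  have hsub' : ∀ x ∈ sp.2, x ∈ pvIntervals pcs root := by
    unfold PySem.Set.issubset at hsub
    simp only [List.all_eq_true] at hsub
    intro x hx
    have := hsub x hx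
    simpa [List.contains_iff_mem] using this
  have hkeep : ((pvIntervals pcs root).filter (fun x => sp.2.contains x)).length = sp.2.length := by
    have hp : ((pvIntervals pcs root).filter (fun x => sp.2.contains x)).Perm sp.2 := by
      refine (List.perm_ext_iff_of_nodup (List.Nodup.filter _ hInd) hspn).mpr ?_
      intro x
      simp only [List.mem_filter, List.contains_iff_mem]
      exact ⟨fun h => h.2, fun h => ⟨hsub' x h, h⟩⟩
    exact hp.length_eq
  have hsplit := List.length_eq_length_filter_add (l := pvIntervals pcs root)
    (fun x => sp.2.contains x)
  have : (PySem.Set.diff (pvIntervals pcs root) sp.2).length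
      = (pvIntervals pcs root).length - sp.2.length := by
    unfold PySem.Set.diff
    unfold PySem.Set.contains
    omega
  rw [this, hIlen]
  have hle : sp.2.length ≤ pcs.length := by
    rw [← hIlen, ← hkeep]
    exact List.length_filter_le _ _
  omega

-- A's candidate for a matching pair is B's match record scored through pvG
lemma emit_eq_g (pcs : List Int) (hbd : ∀ x ∈ pcs, 0 ≤ x ∧ x < 12) (hnd : pcs.Nodup)
    (bass root : Int) (sp : String × List Int) (hspn : sp.2.Nodup)
    (hsub : PySem.Set.issubset sp.2 (pvIntervals pcs root) = true) :
    pvEmit pcs bass root sp = pvG (pcs.length : Int) bass (pvTag root sp) := by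
  unfold pvEmit pvG pvKey pvName pvTag
  refine Prod.ext ?_ rfl
  show (sp.2.length : Int) * 12 - _ * 4 + _ = 16 * (sp.2.length : Int) - 4 * (pcs.length : Int) + _
  rw [diff_len pcs hbd hnd root sp hspn hsub]
  ring

lemma cands_eq_map (pcs : List Int) (hbd : ∀ x ∈ pcs, 0 ≤ x ∧ x < 12) (hnd : pcs.Nodup)
    (bass : Int) (hpat : ∀ sp ∈ chordPatterns, sp.2.Nodup) :
    pvCands pcs bass = (pvMatches pcs).map (pvG (pcs.length : Int) bass) := by
  unfold pvCands pvMatches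
  rw [List.map_flatMap]
  refine List.flatMap_congr fun root _ => ?_
  unfold pvCandsFor
  rw [List.map_map]
  refine List.map_congr_left fun sp hsp => ?_
  have hmem := (List.mem_filter.mp hsp)
  exact emit_eq_g pcs hbd hnd bass root sp (hpat sp hmem.1) hmem.2

-- the whole computation after the shared prefix, over abstract pitch classes / bass / note names
lemma pvCore (nn : List String) (pcs : List Int) (bass : Int)
    (hbd : ∀ x ∈ pcs, 0 ≤ x ∧ x < 12) (hnd : pcs.Nodup) :
    (if pcs.length = 1 then (pcName bass, nn)
     else
       let best := pcs.foldl (fun (b : Option Int × String) rootPc =>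
         chordPatterns.foldl (fun (b : Option Int × String) sp =>
           if PySem.Set.issubset sp.2 (pvIntervals pcs rootPc) then
             pvUpd b (pvEmit pcs bass rootPc sp) else b) b) ((none : Option Int), "")
       if best.2 ≠ "" then (best.2, nn) else ("N.C.", nn))
    = (if pcs.length = 1 then (pcName bass, nn)
       else
         let matchesL := pcs.flatMap (fun root =>
           (chordPatterns.filter (fun sp =>
               sp.2.all (fun iv => PySem.Set.contains (PySem.Set.ofList pcs) (PySem.Int.mod (root + iv) 12)))).map
             (pvTag root))
         match PySem.List.max? (matchesL.map fun m => m.1) (fun x => x) with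
         | none => ("N.C.", nn)
         | some top =>
           let winner := match matchesL.find? (fun m : Int × Int × String => m.1 == top && m.2.1 == bass) with
             | some w => w
             | none => (matchesL.find? (fun m : Int × Int × String => m.1 == top)).getD (0, 0, "")
           let name := pcName winner.2.1 ++ winner.2.2
           let name := if winner.2.1 ≠ bass then name ++ "/" ++ pcName bass else name
           (name, nn)) := by
  by_cases hlen : pcs.length = 1
  · rw [if_pos hlen, if_pos hlen]
  · rw [if_neg hlen, if_neg hlen]
    have hpatn : ∀ sp ∈ chordPatterns, sp.2.Nodup ∧ ∀ iv ∈ sp.2, 0 ≤ iv ∧ iv < 12 := by decide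
    have hA : pcs.foldl (fun (b : Option Int × String) rootPc =>
          chordPatterns.foldl (fun (b : Option Int × String) sp =>
            if PySem.Set.issubset sp.2 (pvIntervals pcs rootPc) then
              pvUpd b (pvEmit pcs bass rootPc sp) else b) b) ((none : Option Int), "")
        = (pvCands pcs bass).foldl pvUpd ((none : Option Int), "") := by
      rw [PySem.List.foldl_congr_mem _ _ (fun b root => (pvCandsFor pcs bass root).foldl pvUpd b) _
        (by intro b root _
            rw [PySem.List.foldl_if_eq_foldl_filter]
            show _ = List.foldl pvUpd b (pvCandsFor pcs bass root)
            unfold pvCandsFor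
            rw [List.foldl_map])]
      rw [pvCands, foldl_flatMap_eq]
    have hMB : pcs.flatMap (fun root =>
          (chordPatterns.filter (fun sp =>
              sp.2.all (fun iv => PySem.Set.contains (PySem.Set.ofList pcs) (PySem.Int.mod (root + iv) 12)))).map
            (pvTag root)) = pvMatches pcs := by
      unfold pvMatches
      refine List.flatMap_congr fun root _ => ?_
      congr 1
      exact List.filter_congr fun sp hsp => (pred_eq pcs hbd root sp (hpatn sp hsp).2).symm
    simp only [hA, foldA_eq, hMB,
      cands_eq_map pcs hbd hnd bass (fun sp h => (hpatn sp h).1)]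
    set C : Int := (pcs.length : Int) with hC
    set M := pvMatches pcs with hMdef
    by_cases hM : M = []
    · simp [hM, pvEnc, PySem.List.max?]
    · obtain ⟨top, htop⟩ : ∃ t, PySem.List.max? (M.map fun m => m.1) (fun x => x) = some t := by
        cases h : PySem.List.max? (M.map fun m => m.1) (fun x => x) with
        | none => exact absurd (by simpa using (PySem.List.max?_eq_none_iff _ _).mp h) hM
        | some t => exact ⟨t, rfl⟩
      have hub_top : ∀ m ∈ M, m.1 ≤ top := fun m hm =>
        PySem.List.max?_isMax htop _ (List.mem_map_of_mem hm)
      have hattain : ∃ m ∈ M, m.1 = top := by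
        have := PySem.List.max?_mem htop
        simpa using this
      simp only [htop]
      by_cases hb : ∃ m ∈ M, m.1 = top ∧ bass = m.2.1
      · -- a size-top match rooted at the bass exists: A's best score is 16*top - 4*C + 3
        set K : Int := 16 * top - 4 * C + 3 with hK
        have key_le : ∀ m ∈ M, pvKey C bass m ≤ K := by
          intro m hm
          have := hub_top m hm
          unfold pvKey
          split_ifs <;> omega
        have hub : ∀ c ∈ M.map (pvG C bass), c.1 ≤ K := by
          intro c hc
          rcases List.mem_map.mp hc with ⟨m, hm, rfl⟩
          exact key_le m hm
        have hex : ∃ c ∈ M.map (pvG C bass), K ≤ c.1 := by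
          rcases hb with ⟨m, hm, h1, h2⟩
          refine ⟨pvG C bass m, List.mem_map_of_mem hm, ?_⟩
          show K ≤ pvKey C bass m
          unfold pvKey
          rw [if_pos h2]
          omega
        rw [pvMax_eq_find? (M.map (pvG C bass)) (fun c => c.1) K hub hex, List.find?_map]
        have hpc : ∀ m ∈ M, ((fun c : Int × String => decide (K ≤ c.1)) ∘ pvG C bass) m
            = (m.1 == top && m.2.1 == bass) := by
          intro m hm
          have hle := hub_top m hm
          show decide (K ≤ pvKey C bass m) = _
          rw [Bool.eq_iff_iff]
          simp only [decide_eq_true_eq, Bool.and_eq_true, beq_iff_eq]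
          unfold pvKey
          by_cases hbm : bass = m.2.1
          · rw [if_pos hbm]
            constructor
            · intro h; exact ⟨by omega, hbm.symm⟩
            · intro h; omega
          · rw [if_neg hbm]
            constructor
            · intro h; omega
            · rintro ⟨h1, h2⟩; exact absurd h2.symm hbm
        rw [pvFind_congr _ _ M hpc]
        cases hw : M.find? (fun m : Int × Int × String => m.1 == top && m.2.1 == bass) with
        | none =>
            rcases hb with ⟨m, hm, h1, h2⟩
            have := List.find?_eq_none.mp hw m hm
            simp [h1, h2.symm] at this
        | some w =>
            simp only [Option.map_some, pvEnc]
            rw [if_pos (show (pvG C bass w).2 ≠ "" from name_ne bass w)]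
            show (pvName bass w, nn) = _
            unfold pvName
            by_cases hq : bass = w.2.1
            · rw [if_neg (by simpa using hq), if_neg (by simpa using hq.symm)]
            · rw [if_pos hq, if_pos (Ne.symm hq)]
      · -- no size-top match rooted at the bass: A's best score is 16*top - 4*C
        set K : Int := 16 * top - 4 * C with hK
        have key_le : ∀ m ∈ M, pvKey C bass m ≤ K := by
          intro m hm
          have hle := hub_top m hm
          have hne : bass = m.2.1 → m.1 ≠ top := fun h2 h1 => hb ⟨m, hm, h1, h2⟩
          unfold pvKey
          split_ifs with hbm
          · have := hne hbm
            omega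
          · omega
        have hub : ∀ c ∈ M.map (pvG C bass), c.1 ≤ K := by
          intro c hc
          rcases List.mem_map.mp hc with ⟨m, hm, rfl⟩
          exact key_le m hm
        have hex : ∃ c ∈ M.map (pvG C bass), K ≤ c.1 := by
          rcases hattain with ⟨m, hm, h1⟩
          refine ⟨pvG C bass m, List.mem_map_of_mem hm, ?_⟩
          show K ≤ pvKey C bass m
          unfold pvKey
          split_ifs <;> omega
        rw [pvMax_eq_find? (M.map (pvG C bass)) (fun c => c.1) K hub hex, List.find?_map]
        have hpc : ∀ m ∈ M, ((fun c : Int × String => decide (K ≤ c.1)) ∘ pvG C bass) m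
            = (m.1 == top) := by
          intro m hm
          have hle := hub_top m hm
          show decide (K ≤ pvKey C bass m) = _
          rw [Bool.eq_iff_iff]
          simp only [decide_eq_true_eq, beq_iff_eq]
          unfold pvKey
          split_ifs <;> omega
        rw [pvFind_congr _ _ M hpc]
        have hw1 : M.find? (fun m : Int × Int × String => m.1 == top && m.2.1 == bass) = none := by
          rw [List.find?_eq_none]
          intro m hm hpred
          simp only [Bool.and_eq_true, beq_iff_eq] at hpred
          exact hb ⟨m, hm, hpred.1, hpred.2.symm⟩
        rw [hw1]
        obtain ⟨w, hw⟩ : ∃ w, M.find? (fun m : Int × Int × String => m.1 == top) = some w := by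
          have : (M.find? (fun m : Int × Int × String => m.1 == top)).isSome := by
            rw [List.find?_isSome]
            rcases hattain with ⟨m, hm, h1⟩
            exact ⟨m, hm, by simp [h1]⟩
          exact Option.isSome_iff_exists.mp this
        rw [hw]
        simp only [Option.map_some, Option.getD_some, pvEnc]
        rw [if_pos (show (pvG C bass w).2 ≠ "" from name_ne bass w)]
        show (pvName bass w, nn) = _
        unfold pvName
        by_cases hq : bass = w.2.1
        · rw [if_neg (by simpa using hq), if_neg (by simpa using hq.symm)]
        · rw [if_pos hq, if_pos (Ne.symm hq)]

-- ===== VERDICT (by name: the statement is the Claim_ definition above) =====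
theorem detect_chord_py_spec : Claim_equal_detect_chord_py := by
  unfold Claim_equal_detect_chord_py
  intro ap _
  show detect_chord_py ap = detect_chord_py_alt ap
  unfold detect_chord_py detect_chord_py_alt
  by_cases hap : ap = []
  · simp [hap]
  · simp only [if_neg hap, PySem.List.dedup_eq_ofList]
    have hbd : ∀ x ∈ PySem.List.sorted
        (PySem.Set.ofList ((PySem.List.sorted (PySem.Set.ofList ap) (fun x => x) false).map
          fun p => PySem.Int.mod p 12)) (fun x => x) false, 0 ≤ x ∧ x < 12 := by
      intro x hx
      rw [PySem.List.mem_sorted, PySem.Set.mem_ofList] at hx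
      rcases List.mem_map.mp hx with ⟨p, _, rfl⟩
      exact ⟨PySem.Int.mod_nonneg p (by norm_num), PySem.Int.mod_lt p (by norm_num)⟩
    have hnd : (PySem.List.sorted
        (PySem.Set.ofList ((PySem.List.sorted (PySem.Set.ofList ap) (fun x => x) false).map
          fun p => PySem.Int.mod p 12)) (fun x => x) false).Nodup :=
      (PySem.List.sorted_perm _ _ _).symm.nodup (PySem.Set.nodup_ofList _)
    exact pvCore _ _ _ hbd hnd
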